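-- pv_equiv track=rewrite | github.com/mledl/BDMA_HW | HW3/app/app_lsh.py | get_buckets_per_doc
-- ===== SOURCE A (Python) =====
-- def get_buckets_per_doc(band):
--     signatures_bands = {}
--
--     for row in band:
--         for index_col, value_col in enumerate(list(row)):
--             key = 'doc_' + str(index_col)
--             if key in signatures_bands:
--                 signatures_bands[key] = signatures_bands[key] + str(value_col)
--             else:
--                 signatures_bands[key] = str(value_col)
--
--     return signatures_bands.items()
-- ===== SOURCE B (Python) =====
-- def get_buckets_per_doc(band):
--     # column-major: find the widest row, then build each doc_i bucket by one join
--     max_len = 0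
--     for row in band:
--         if len(row) > max_len:
--             max_len = len(row)
--     buckets = {}
--     for i in range(max_len):
--         buckets['doc_' + str(i)] = ''.join(str(row[i]) for row in band if i < len(row))
--     return buckets.items()
-- ===== Notes on version B (the rewrite author's own statement) =====
-- stated objective: faster
-- what changed: Row-major incremental dict of growing string concatenations replaced by a column-major pass: compute the maximum row length once, then build each doc_i bucket with a single ''.join over the rows that reach column i.
import Mathlib
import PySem

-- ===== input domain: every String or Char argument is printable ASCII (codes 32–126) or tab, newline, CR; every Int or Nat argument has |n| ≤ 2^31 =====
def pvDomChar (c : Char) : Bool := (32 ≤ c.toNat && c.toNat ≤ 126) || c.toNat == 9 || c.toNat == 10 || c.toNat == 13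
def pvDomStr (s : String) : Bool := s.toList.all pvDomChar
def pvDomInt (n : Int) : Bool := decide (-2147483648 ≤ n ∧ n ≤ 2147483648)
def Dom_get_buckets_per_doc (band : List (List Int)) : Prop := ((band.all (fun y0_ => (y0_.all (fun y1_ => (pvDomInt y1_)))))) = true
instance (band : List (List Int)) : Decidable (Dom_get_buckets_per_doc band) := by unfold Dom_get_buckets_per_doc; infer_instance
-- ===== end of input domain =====

-- B replaces A's row-major incremental concatenation dict with a column-major pass
-- (max row length once, then one join per column); objective: alternative decomposition.


-- ===== PORT A =====
def get_buckets_per_doc (band : List (List Int)) : List (String × String) :=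
  (band.foldl (fun d row =>
      (PySem.List.enumerate row).foldl (fun d p =>
        let k := "doc_" ++ PySem.Int.toStr p.1
        if d.contains k then d.insert k (d.getD k "" ++ PySem.Int.toStr p.2)
        else d.insert k (PySem.Int.toStr p.2)) d)
    (PySem.Dict.empty : PySem.Dict String String)).items

-- ===== PORT B =====
def get_buckets_per_doc_alt (band : List (List Int)) : List (String × String) :=
  let maxLen : Nat := band.foldl (fun a row => if row.length > a then row.length else a) 0
  ((List.range maxLen).foldl
    (fun d i => d.insert ("doc_" ++ PySem.Int.toStr (i : Int))
      (PySem.Str.join "" ((band.filter (fun row => decide (i < row.length))).map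
        (fun row => PySem.Int.toStr (PySem.List.pyGetD row (i : Int) 0)))))
    (PySem.Dict.empty : PySem.Dict String String)).items

-- ===== PRECONDITION & SPEC =====
def Spec_get_buckets_per_doc (band : List (List Int)) (out : List (String × String)) : Prop := out = get_buckets_per_doc_alt band
instance (band : List (List Int)) (out : List (String × String)) : Decidable (Spec_get_buckets_per_doc band out) := by unfold Spec_get_buckets_per_doc; infer_instance

-- ===== CLAIM (what is proved, stated in full; the proofs are below) =====
def Claim_equal_get_buckets_per_doc : Prop := ∀ (band : List (List Int)), Dom_get_buckets_per_doc band → Spec_get_buckets_per_doc band (get_buckets_per_doc band)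

-- ===== LEMMAS AND PROOFS =====

-- decimal digits of a natural number, most significant first (spec for Nat.toDigits 10)
def pvDigs (n : Nat) : List Char :=
  if h : n < 10 then [Nat.digitChar n]
  else pvDigs (n / 10) ++ [Nat.digitChar (n % 10)]
decreasing_by exact Nat.div_lt_self (by omega) (by omega)

lemma pvDigitChar_inj (a b : Nat) (ha : a < 10) (hb : b < 10)
    (h : Nat.digitChar a = Nat.digitChar b) : a = b := by
  have key : ∀ x : Fin 10, ∀ y : Fin 10, Nat.digitChar x.val = Nat.digitChar y.val → x = y := by decide
  have := key ⟨a, ha⟩ ⟨b, hb⟩ h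
  simpa using congrArg Fin.val this

lemma pvDigs_lt {n : Nat} (h : n < 10) : pvDigs n = [Nat.digitChar n] := by
  rw [pvDigs]; simp [h]

lemma pvDigs_ge {n : Nat} (h : ¬ n < 10) : pvDigs n = pvDigs (n / 10) ++ [Nat.digitChar (n % 10)] := by
  rw [pvDigs]; simp [h]

lemma pvToDigitsCore_eq : ∀ (f n : Nat) (l : List Char), n < f →
    Nat.toDigitsCore 10 f n l = pvDigs n ++ l := by
  intro f
  induction f with
  | zero => intro n l h; omega
  | succ f ih =>
    intro n l h
    rw [Nat.toDigitsCore]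
    by_cases h10 : n < 10
    · have hz : n / 10 = 0 := Nat.div_eq_of_lt h10
      simp [hz, pvDigs_lt h10, Nat.mod_eq_of_lt h10]
    · have hne : ¬ (n / 10 = 0) := by
        intro hz; exact h10 (by omega)
      have hlt : n / 10 < f := by
        have := Nat.div_lt_self (show 0 < n by omega) (show 1 < 10 by omega)
        omega
      simp only [hne, if_false]
      rw [ih (n / 10) _ hlt, pvDigs_ge h10]
      simp

lemma pvToDigits_eq (n : Nat) : Nat.toDigits 10 n = pvDigs n := by
  unfold Nat.toDigits
  simpa using pvToDigitsCore_eq (n + 1) n [] (by omega)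

lemma pvDigs_ne_nil (n : Nat) : pvDigs n ≠ [] := by
  rw [pvDigs]; split_ifs <;> simp

lemma pvDigs_inj : ∀ (n m : Nat), pvDigs n = pvDigs m → n = m := by
  intro n
  induction n using Nat.strong_induction_on with
  | _ n ih =>
    intro m h
    by_cases hn : n < 10 <;> by_cases hm : m < 10
    · rw [pvDigs_lt hn, pvDigs_lt hm] at h
      simp at h
      exact pvDigitChar_inj n m hn hm h
    · rw [pvDigs_lt hn, pvDigs_ge hm] at h
      have hl := congrArg List.length h
      simp at hl
      exact absurd hl (pvDigs_ne_nil _)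
    · rw [pvDigs_ge hn, pvDigs_lt hm] at h
      have hl := congrArg List.length h
      simp at hl
      exact absurd hl (pvDigs_ne_nil _)
    · rw [pvDigs_ge hn, pvDigs_ge hm] at h
      have h2 := List.append_inj' h (by simp)
      have hdiv := ih (n / 10) (Nat.div_lt_self (by omega) (by omega)) (m / 10) h2.1
      have hmod : n % 10 = m % 10 := by
        have h3 := h2.2
        simp at h3
        exact pvDigitChar_inj _ _ (Nat.mod_lt _ (by omega)) (Nat.mod_lt _ (by omega)) h3
      omega

-- the key 'doc_' + str(i)
def pvKey (i : Nat) : String := "doc_" ++ PySem.Int.toStr (i : Int)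

lemma pvToChars_nat (n : Nat) : PySem.Int.toChars (n : Int) = pvDigs n := by
  unfold PySem.Int.toChars
  simp [pvToDigits_eq]

lemma pvKey_inj : ∀ (a b : Nat), pvKey a = pvKey b → a = b := by
  intro a b h
  unfold pvKey at h
  have h2 : ("doc_" ++ PySem.Int.toStr (a : Int)).toList = ("doc_" ++ PySem.Int.toStr (b : Int)).toList := by rw [h]
  rw [String.toList_append, String.toList_append, PySem.Int.toList_toStr, PySem.Int.toList_toStr] at h2
  have h3 := List.append_cancel_left h2
  rw [pvToChars_nat, pvToChars_nat] at h3
  exact pvDigs_inj _ _ h3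

lemma pvKey_nodup (m : Nat) : ((List.range m).map pvKey).Nodup :=
  (List.nodup_range).map (fun {a b} h => pvKey_inj a b h)

-- column i's concatenated string over a list of rows
def pvCol (rows : List (List Int)) (i : Nat) : String :=
  match rows with
  | [] => ""
  | r :: rest => (if i < r.length then PySem.Int.toStr (r.getD i 0) else "") ++ pvCol rest i

lemma pvCol_append (xs ys : List (List Int)) (i : Nat) :
    pvCol (xs ++ ys) i = pvCol xs i ++ pvCol ys i := by
  induction xs with
  | nil => simp [pvCol]
  | cons r rest ih => simp [pvCol, ih, String.append_assoc]

lemma pvCol_empty_of_ge (rows : List (List Int)) (i : Nat)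
    (h : ∀ r ∈ rows, r.length ≤ i) : pvCol rows i = "" := by
  induction rows with
  | nil => rfl
  | cons r rest ih =>
    have hr : ¬ i < r.length := by have := h r (by simp); omega
    simp [pvCol, hr, ih (fun r hr => h r (by simp [hr]))]

-- max row length
def pvMax (rows : List (List Int)) : Nat := rows.foldl (fun a r => max a r.length) 0

lemma pvMax_le (rows : List (List Int)) : ∀ r ∈ rows, r.length ≤ pvMax rows :=
  (PySem.List.le_foldl_max_nat rows List.length 0).2

lemma pvMax_append_singleton (rows : List (List Int)) (row : List Int) :
    pvMax (rows ++ [row]) = max (pvMax rows) row.length := by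
  unfold pvMax; rw [List.foldl_append]; rfl

lemma pvMaxAlt (rows : List (List Int)) :
    rows.foldl (fun a row => if row.length > a then row.length else a) 0 = pvMax rows := by
  unfold pvMax
  suffices h : ∀ (acc : Nat), rows.foldl (fun a row => if row.length > a then row.length else a) acc
      = rows.foldl (fun a r => max a r.length) acc by exact h 0
  induction rows with
  | nil => intro acc; rfl
  | cons r rest ih =>
    intro acc
    simp only [List.foldl_cons]
    have : (if r.length > acc then r.length else acc) = max acc r.length := by
      split_ifs <;> omega
    rw [this, ih]

-- join with empty separator unfolds to concatenation
lemma pvJoin_cons (p : String) (rest : List String) :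
    PySem.Str.join "" (p :: rest) = p ++ PySem.Str.join "" rest := by
  rw [← String.toList_inj]
  rw [String.toList_append, PySem.Str.toList_join, PySem.Str.toList_join]
  cases rest with
  | nil => simp [PySem.Chars.join, List.intercalate]
  | cons q t =>
    simp only [List.map_cons]
    rw [PySem.Chars.join_cons_cons]
    simp

lemma pvJoin_eq_pvCol (rows : List (List Int)) (i : Nat) :
    PySem.Str.join "" ((rows.filter (fun row => decide (i < row.length))).map
      (fun row => PySem.Int.toStr (PySem.List.pyGetD row (i : Int) 0))) = pvCol rows i := by
  induction rows with
  | nil => rfl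
  | cons r rest ih =>
    by_cases h : i < r.length
    · have hf : (r :: rest).filter (fun row => decide (i < row.length))
          = r :: rest.filter (fun row => decide (i < row.length)) := by simp [h]
      rw [hf, List.map_cons, pvJoin_cons, ih]
      simp [pvCol, h, PySem.List.pyGetD_natCast]
    · have hf : (r :: rest).filter (fun row => decide (i < row.length))
          = rest.filter (fun row => decide (i < row.length)) := by simp [h]
      rw [hf, ih]
      simp [pvCol, h]

-- the characterization of B's dict items
lemma pvB_items (band : List (List Int)) :
    get_buckets_per_doc_alt band = (List.range (pvMax band)).map (fun i => (pvKey i, pvCol band i)) := by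
  unfold get_buckets_per_doc_alt
  rw [pvMaxAlt]
  rw [PySem.Dict.items_foldl_insert_fresh (List.range (pvMax band))
      (fun i => "doc_" ++ PySem.Int.toStr (i : Int)) _ _
      (by intro a _; exact PySem.Dict.contains_empty _)
      (pvKey_nodup (pvMax band))]
  simp only [PySem.Dict.empty, List.nil_append]
  exact List.map_congr_left (fun i _ => by rw [pvJoin_eq_pvCol]; rfl)

-- the inner loop of A over one enumerated row
lemma pvInner (row : List Int) : ∀ (s m : Nat) (v : Nat → String) (d : PySem.Dict String String),
    s ≤ m →
    d.items = (List.range m).map (fun i => (pvKey i, v i)) →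
    ((PySem.List.enumerate row (s : Int)).foldl (fun d p =>
        let k := "doc_" ++ PySem.Int.toStr p.1
        if d.contains k then d.insert k (d.getD k "" ++ PySem.Int.toStr p.2)
        else d.insert k (PySem.Int.toStr p.2)) d).items =
      (List.range (max m (s + row.length))).map (fun i => (pvKey i,
        if s ≤ i ∧ i < s + row.length then (if i < m then v i else "") ++ PySem.Int.toStr (row.getD (i - s) 0) else v i)) := by
  induction row with
  | nil =>
    intro s m v d hsm hitems
    simp only [PySem.List.enumerate_nil, List.foldl_nil, List.length_nil, Nat.add_zero,
      Nat.max_eq_left hsm, hitems]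
    apply List.map_congr_left
    intro i _
    have : ¬ (s ≤ i ∧ i < s) := by omega
    simp [this]
  | cons x rest ih =>
    intro s m v d hsm hitems
    have hkeys : d.keys = (List.range m).map pvKey := by
      show d.items.map Prod.fst = _
      rw [hitems, List.map_map]
      rfl
    have hnodup : d.keys.Nodup := by rw [hkeys]; exact pvKey_nodup m
    rw [PySem.List.enumerate_cons, List.foldl_cons]
    have hcast : (s : Int) + 1 = ((s + 1 : Nat) : Int) := by push_cast; ring
    by_cases hlt : s < m
    · -- key already present: update in place
      have hcontains : d.contains (pvKey s) = true := by
        rw [PySem.Dict.contains_iff_mem_keys, hkeys]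
        exact List.mem_map_of_mem (List.mem_range.mpr hlt)
      have hval : d.getD (pvKey s) "" = v s :=
        PySem.Dict.getD_of_mem_items d
          (by rw [hitems]; exact List.mem_map_of_mem (List.mem_range.mpr hlt)) hnodup ""
      have hitems1 : ((fun (d : PySem.Dict String String) (p : Int × Int) =>
            let k := "doc_" ++ PySem.Int.toStr p.1
            if d.contains k then d.insert k (d.getD k "" ++ PySem.Int.toStr p.2)
            else d.insert k (PySem.Int.toStr p.2)) d ((s : Int), x)).items =
          (List.range m).map (fun i => (pvKey i,
            if i = s then v s ++ PySem.Int.toStr x else v i)) := by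
        show ((if d.contains (pvKey s) then
            d.insert (pvKey s) (d.getD (pvKey s) "" ++ PySem.Int.toStr x)
          else d.insert (pvKey s) (PySem.Int.toStr x))).items = _
        rw [if_pos (by rw [hcontains]), hval]
        rw [PySem.Dict.items_insert_of_contains d _ hcontains, hitems, List.map_map]
        apply List.map_congr_left
        intro i _
        by_cases his : i = s
        · subst his; simp
        · have hne : (pvKey i == pvKey s) = false :=
            beq_eq_false_iff_ne.mpr (fun hk => his (pvKey_inj _ _ hk))
          rw [Function.comp_apply, hne]
          simp [his]
      rw [hcast, ih (s + 1) m _ _ (by omega) hitems1]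
      have hb : max m (s + 1 + rest.length) = max m (s + (x :: rest).length) := by
        simp only [List.length_cons]; omega
      rw [hb]
      apply List.map_congr_left
      intro i _
      simp only [Prod.mk.injEq, true_and]
      by_cases his : i = s
      · subst his
        rw [if_neg (show ¬ (i + 1 ≤ i ∧ i < i + 1 + rest.length) by omega),
          if_pos rfl,
          if_pos (show i ≤ i ∧ i < i + (x :: rest).length by
            simp only [List.length_cons]; omega),
          if_pos hlt, Nat.sub_self, List.getD_cons_zero]
      · simp only [if_neg his]
        by_cases hin : s + 1 ≤ i ∧ i < s + 1 + rest.length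
        · have hgd : (x :: rest).getD (i - s) 0 = rest.getD (i - (s + 1)) 0 := by
            have h5 : i - s = (i - (s + 1)) + 1 := by omega
            rw [h5, List.getD_cons_succ]
          rw [if_pos hin,
            if_pos (show s ≤ i ∧ i < s + (x :: rest).length by
              simp only [List.length_cons]; omega),
            hgd]
        · rw [if_neg hin,
            if_neg (show ¬ (s ≤ i ∧ i < s + (x :: rest).length) by
              simp only [List.length_cons]; omega)]
    · -- fresh key: appended at position m (= s)
      have hseq : s = m := by omega
      subst hseq
      have hcontains : d.contains (pvKey s) = false := by
        cases hcb : d.contains (pvKey s) with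
        | false => rfl
        | true =>
          exfalso
          have hmem := (PySem.Dict.contains_iff_mem_keys d (pvKey s)).mp hcb
          rw [hkeys] at hmem
          obtain ⟨j, hj, hjk⟩ := List.mem_map.mp hmem
          have hje := pvKey_inj _ _ hjk
          subst hje
          exact absurd (List.mem_range.mp hj) (by omega)
      have hitems1 : ((fun (d : PySem.Dict String String) (p : Int × Int) =>
            let k := "doc_" ++ PySem.Int.toStr p.1
            if d.contains k then d.insert k (d.getD k "" ++ PySem.Int.toStr p.2)
            else d.insert k (PySem.Int.toStr p.2)) d ((s : Int), x)).items =
          (List.range (s + 1)).map (fun i => (pvKey i,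
            if i = s then PySem.Int.toStr x else v i)) := by
        show ((if d.contains (pvKey s) then
            d.insert (pvKey s) (d.getD (pvKey s) "" ++ PySem.Int.toStr x)
          else d.insert (pvKey s) (PySem.Int.toStr x))).items = _
        rw [if_neg (by rw [hcontains]; simp)]
        rw [PySem.Dict.items_insert_of_not_contains d _ hcontains, hitems]
        rw [List.range_succ, List.map_append]
        congr 1
        · apply List.map_congr_left
          intro i hi
          have hne : i ≠ s := by have := List.mem_range.mp hi; omega
          simp [hne]
        · simp
      rw [hcast, ih (s + 1) (s + 1) _ _ (by omega) hitems1]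
      have hb : max (s + 1) (s + 1 + rest.length) = max s (s + (x :: rest).length) := by
        simp only [List.length_cons]; omega
      rw [hb]
      apply List.map_congr_left
      intro i _
      simp only [Prod.mk.injEq, true_and]
      by_cases his : i = s
      · subst his
        rw [if_neg (show ¬ (i + 1 ≤ i ∧ i < i + 1 + rest.length) by omega),
          if_pos rfl,
          if_pos (show i ≤ i ∧ i < i + (x :: rest).length by
            simp only [List.length_cons]; omega),
          if_neg (show ¬ i < i by omega), Nat.sub_self, List.getD_cons_zero,
          String.empty_append]
      · simp only [if_neg his]
        by_cases hin : s + 1 ≤ i ∧ i < s + 1 + rest.length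
        · have hgd : (x :: rest).getD (i - s) 0 = rest.getD (i - (s + 1)) 0 := by
            have h5 : i - s = (i - (s + 1)) + 1 := by omega
            rw [h5, List.getD_cons_succ]
          rw [if_pos hin,
            if_pos (show s ≤ i ∧ i < s + (x :: rest).length by
              simp only [List.length_cons]; omega),
            if_neg (show ¬ i < s + 1 by omega),
            if_neg (show ¬ i < s by omega),
            hgd]
        · rw [if_neg hin,
            if_neg (show ¬ (s ≤ i ∧ i < s + (x :: rest).length) by
              simp only [List.length_cons]; omega)]

-- A's dict as a named fold (proof-side copy of the port's fold)
def pvDictA (band : List (List Int)) : PySem.Dict String String :=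
  band.foldl (fun d row =>
      (PySem.List.enumerate row).foldl (fun d p =>
        let k := "doc_" ++ PySem.Int.toStr p.1
        if d.contains k then d.insert k (d.getD k "" ++ PySem.Int.toStr p.2)
        else d.insert k (PySem.Int.toStr p.2)) d)
    (PySem.Dict.empty : PySem.Dict String String)

lemma pvDictA_items (band : List (List Int)) :
    (pvDictA band).items = (List.range (pvMax band)).map (fun i => (pvKey i, pvCol band i)) := by
  induction band using List.reverseRecOn with
  | nil => rfl
  | append_singleton pre row ih =>
    unfold pvDictA at ih ⊢
    rw [List.foldl_append, List.foldl_cons, List.foldl_nil]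
    have hmain := pvInner row 0 (pvMax pre) (pvCol pre) _ (Nat.zero_le _) ih
    rw [show ((0 : Nat) : Int) = (0 : Int) from rfl] at hmain
    rw [hmain, pvMax_append_singleton]
    simp only [Nat.zero_add]
    apply List.map_congr_left
    intro i _
    simp only [Prod.mk.injEq, true_and, Nat.sub_zero]
    rw [pvCol_append]
    by_cases hrow : i < row.length
    · rw [if_pos (by omega : 0 ≤ i ∧ i < row.length)]
      by_cases hm : i < pvMax pre
      · rw [if_pos hm]
        simp [pvCol, hrow, String.append_empty]
      · rw [if_neg hm]
        have hcol : pvCol pre i = "" :=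
          pvCol_empty_of_ge pre i (fun r hr => by have := pvMax_le pre r hr; omega)
        rw [hcol]
        simp [pvCol, hrow, String.append_empty]
    · rw [if_neg (by omega : ¬ (0 ≤ i ∧ i < row.length))]
      simp [pvCol, hrow, String.append_empty]

-- the characterization of A's dict items
lemma pvA_items (band : List (List Int)) :
    get_buckets_per_doc band = (List.range (pvMax band)).map (fun i => (pvKey i, pvCol band i)) := by
  have h : get_buckets_per_doc band = (pvDictA band).items := rfl
  rw [h, pvDictA_items]

-- ===== VERDICT (by name: the statement is the Claim_ definition above) =====
theorem get_buckets_per_doc_spec : Claim_equal_get_buckets_per_doc := by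
  intro band _
  unfold Spec_get_buckets_per_doc
  rw [pvA_items, pvB_items]
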